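-- pv_equiv track=rewrite | github.com/DeepLcom/deepl-python | examples/mustache/mustache.py | convert_mustache_to_xml
-- ===== SOURCE A (Python) =====
-- from typing import Dict, Iterator, List, Optional, Tuple
--
-- def tokenize_mustache(
--     template: str, delimiters: List[Tuple[str, str]]
-- ) -> Iterator[Tuple[str, str]]:
--     """
--     Tokenizes Mustache template with given delimiters, yielding tuples of
--     ("literal", text) or ("tag", tag-content).
--
--     :param template: Mustache template text.
--     :param delimiters: List of left and right delimiters identifying Mustache
--         tags.
--     """
--     literal = ""
--     while template:
--         # Find the next Mustache tag
--         for ldel, rdel in delimiters: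
--             if not template.startswith(ldel):
--                 continue
--             rpos = template.find(rdel, len(ldel))
--             if rpos == -1:
--                 continue
--             rpos += len(rdel)
--
--             yield "literal", literal
--             literal = ""
--             yield "tag", template[0:rpos]
--             template = template[rpos:]
--             break
--         else:
--             # Template does not begin with tag, append to literal
--             literal += template[0]
--             template = template[1:]
--
--     if literal:
--         yield "literal", literal
--
-- def convert_mustache_to_xml(
--     template: str, placeholder_tag: str, delimiters: List[Tuple[str, str]]
-- ) -> Tuple[str, Dict[str, str]]:
--     """
--     Converts Mustache template to XML by replacing Mustache tags with
--     placeholder XML tags.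
--
--     :param template: Mustache template text.
--     :param placeholder_tag: XML tag name for placeholder tags.
--     :param delimiters: List of left and right delimiters identifying Mustache
--         tags.
--     :return XML and dictionary of replaced tags.
--     """
--     xml = ""
--     id_counter = 0
--     extracted_tokens = {}
--
--     tokens = tokenize_mustache(template, delimiters)
--     for tag_type, tag_content in tokens:
--         if tag_type == "tag":
--             tag_id = str(id_counter)
--             id_counter += 1
--             xml += f"<{placeholder_tag} id={tag_id} />"
--             extracted_tokens[f"{placeholder_tag}#{tag_id}"] = tag_content
--         else:
--             xml += tag_content
--
--     return xml, extracted_tokens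
-- ===== SOURCE B (Python) =====
-- def convert_mustache_to_xml(template, placeholder_tag, delimiters):
--     """Single-pass bulk-find rewrite: instead of scanning character by character
--     through a tokenizer generator, repeatedly locate the earliest complete tag
--     (per delimiter pair via str.find, earliest start wins, ties by pair order)
--     and copy whole literal chunks by slicing."""
--     parts = []
--     extracted_tokens = {}
--     id_counter = 0
--     while template:
--         best = None  # (start, end) of earliest complete tag
--         for ldel, rdel in delimiters:
--             j = template.find(ldel)
--             if j == -1:
--                 continue
--             r = template.find(rdel, j + len(ldel))
--             if r == -1:
--                 continue
--             if best is None or j < best[0]: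
--                 best = (j, r + len(rdel))
--         if best is None:
--             parts.append(template)
--             break
--         j, end = best
--         parts.append(template[:j])
--         parts.append(f"<{placeholder_tag} id={id_counter} />")
--         extracted_tokens[f"{placeholder_tag}#{id_counter}"] = template[j:end]
--         id_counter += 1
--         template = template[end:]
--     return "".join(parts), extracted_tokens
-- ===== Notes on version B (the rewrite author's own statement) =====
-- stated objective: faster
-- what changed: Replaced the character-by-character generator tokenizer (startswith at every position, literal accumulator) with a single loop that locates the earliest complete tag per delimiter pair via bulk str.find and copies literal chunks by slicing.
import Mathlib
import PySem

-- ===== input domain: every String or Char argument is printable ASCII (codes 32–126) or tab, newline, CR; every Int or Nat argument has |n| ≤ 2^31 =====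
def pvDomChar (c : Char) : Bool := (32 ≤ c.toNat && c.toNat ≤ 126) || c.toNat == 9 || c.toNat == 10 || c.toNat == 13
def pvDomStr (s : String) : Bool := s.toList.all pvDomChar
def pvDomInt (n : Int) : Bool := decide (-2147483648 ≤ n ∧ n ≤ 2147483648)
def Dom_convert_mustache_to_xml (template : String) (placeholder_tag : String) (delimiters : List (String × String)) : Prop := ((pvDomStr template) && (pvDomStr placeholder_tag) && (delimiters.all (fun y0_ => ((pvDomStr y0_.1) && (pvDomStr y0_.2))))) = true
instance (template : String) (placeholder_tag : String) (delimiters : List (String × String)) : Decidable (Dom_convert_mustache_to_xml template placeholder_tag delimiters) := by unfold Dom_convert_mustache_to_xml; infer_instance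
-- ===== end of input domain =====

-- B replaces A's character-by-character generator tokenizer with a bulk str.find/slice
-- scan that jumps from tag to tag (earliest delimiter match wins, ties by pair order);
-- return values agree on Pre_ (which only excludes the ("","") delimiter pair, on which
-- the Python A can loop forever).


-- f-string helpers shared by both ports: f"<{tag} id={i} />" and f"{tag}#{i}"
def pvPH (pt : List Char) (i : Int) : List Char :=
  ('<' :: pt) ++ " id=".toList ++ PySem.Int.toChars i ++ " />".toList

def pvKey (pt : List Char) (i : Int) : String :=
  String.ofList (pt ++ '#' :: PySem.Int.toChars i)

-- ===== PORT A =====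
-- inner body of the 'for ldel, rdel in delimiters' loop: one pair's attempt at the
-- current suffix; some rpos = tag found, content = template[0:rpos]
def pvTagMatch (t : List Char) (p : String × String) : Option Int :=
  if PySem.Chars.startswith t p.1.toList then
    let rpos := PySem.Chars.findFrom t p.2.toList (p.1.toList.length : Int)
    if rpos = -1 then none else some (rpos + p.2.toList.length)
  else none

-- the for/else: first pair that matches
def pvFindTag (t : List Char) : List (String × String) → Option Int
  | [] => none
  | p :: rest =>
    match pvTagMatch t p with
    | some e => some e
    | none => pvFindTag t rest

-- tokenize_mustache: the while loop; fuel bounds the iteration count (each iteration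
-- consumes at least one character on every input Pre_ admits)
def pvTokenize (D : List (String × String)) : Nat → List Char → List Char → List (String × List Char)
  | 0, _, _ => []
  | Nat.succ fuel, t, lit =>
    match t with
    | [] => if lit ≠ [] then [("literal", lit)] else []
    | c :: rest =>
      match pvFindTag (c :: rest) D with
      | some rpos =>
        ("literal", lit) :: ("tag", PySem.List.slice (c :: rest) (some 0) (some rpos)) ::
          pvTokenize D fuel (PySem.List.slice (c :: rest) (some rpos) none) []
      | none => pvTokenize D fuel rest (lit ++ [c])

-- body of 'for tag_type, tag_content in tokens'
def pvConvStep (pt : String) (acc : List Char × Int × PySem.Dict String String)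
    (tok : String × List Char) : List Char × Int × PySem.Dict String String :=
  if tok.1 = "tag" then
    (acc.1 ++ pvPH pt.toList acc.2.1, acc.2.1 + 1,
      acc.2.2.insert (pvKey pt.toList acc.2.1) (String.ofList tok.2))
  else (acc.1 ++ tok.2, acc.2.1, acc.2.2)

def convert_mustache_to_xml (template : String) (placeholder_tag : String)
    (delimiters : List (String × String)) : String × (List (String × String)) :=
  let tokens := pvTokenize delimiters (template.toList.length + 1) template.toList []
  let res := tokens.foldl (pvConvStep placeholder_tag) ([], 0, (∅ : PySem.Dict String String))
  (String.ofList res.1, res.2.2.items)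

-- ===== PORT B =====
-- one pair's candidate: earliest complete tag (start, end) for this pair, via find
def pvCand (t : List Char) (p : String × String) : Option (Int × Int) :=
  let j := PySem.Chars.find t p.1.toList
  if j = -1 then none
  else
    let r := PySem.Chars.findFrom t p.2.toList (j + p.1.toList.length)
    if r = -1 then none
    else some (j, r + p.2.toList.length)

-- the 'for ldel, rdel' loop updating best
def pvBestAux (t : List Char) (best : Option (Int × Int)) :
    List (String × String) → Option (Int × Int)
  | [] => best
  | p :: rest =>
    pvBestAux t
      (match pvCand t p with
       | none => best
       | some c =>
         match best with
         | none => some c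
         | some b => if c.1 < b.1 then some c else some b) rest

def pvBest (t : List Char) (D : List (String × String)) : Option (Int × Int) :=
  pvBestAux t none D

-- the while loop; fuel bounds iterations (each consumes ≥ 1 char under Pre_)
def pvLoop (pt : String) (D : List (String × String)) :
    Nat → List Char → List Char → Int → PySem.Dict String String →
    List Char × PySem.Dict String String
  | 0, _, parts, _, d => (parts, d)
  | Nat.succ fuel, t, parts, cnt, d =>
    match t with
    | [] => (parts, d)
    | c :: rest =>
      match pvBest (c :: rest) D with
      | none => (parts ++ (c :: rest), d)
      | some (j, e) =>
        pvLoop pt D fuel (PySem.List.slice (c :: rest) (some e) none)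
          (parts ++ PySem.List.slice (c :: rest) none (some j) ++ pvPH pt.toList cnt)
          (cnt + 1)
          (d.insert (pvKey pt.toList cnt)
            (String.ofList (PySem.List.slice (c :: rest) (some j) (some e))))

def convert_mustache_to_xml_alt (template : String) (placeholder_tag : String)
    (delimiters : List (String × String)) : String × (List (String × String)) :=
  let res := pvLoop placeholder_tag delimiters (template.toList.length + 1) template.toList []
    0 (∅ : PySem.Dict String String)
  (String.ofList res.1, res.2.items)

-- ===== PRECONDITION & SPEC =====
-- Pre_ excludes nonempty templates whose delimiter list contains the pair ("", ""):
-- on such inputs A's tokenizer makes no progress and loops forever whenever that pair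
-- is selected (and so does B); on a few of them A still happens to return (when other
-- pairs always match first) — those are excluded with Pre_ as well.
def Pre_convert_mustache_to_xml (template : String) (placeholder_tag : String)
    (delimiters : List (String × String)) : Prop :=
  template = "" ∨ ("", "") ∉ delimiters

instance (template : String) (placeholder_tag : String) (delimiters : List (String × String)) :
    Decidable (Pre_convert_mustache_to_xml template placeholder_tag delimiters) := by
  unfold Pre_convert_mustache_to_xml; infer_instance

def pvWitness_convert_mustache_to_xml : String × String × (List (String × String)) :=
  ("a{x}b", "ph", [("{", "}")])

def Spec_convert_mustache_to_xml (template : String) (placeholder_tag : String)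
    (delimiters : List (String × String)) (out : String × (List (String × String))) : Prop :=
  out = convert_mustache_to_xml_alt template placeholder_tag delimiters

instance (template : String) (placeholder_tag : String) (delimiters : List (String × String))
    (out : String × (List (String × String))) :
    Decidable (Spec_convert_mustache_to_xml template placeholder_tag delimiters out) := by
  unfold Spec_convert_mustache_to_xml; infer_instance

-- ===== CLAIM =====
def Claim_equal_convert_mustache_to_xml : Prop :=
  ∀ (template : String) (placeholder_tag : String) (delimiters : List (String × String)),
    Dom_convert_mustache_to_xml template placeholder_tag delimiters →
    Pre_convert_mustache_to_xml template placeholder_tag delimiters →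
    Spec_convert_mustache_to_xml template placeholder_tag delimiters
      (convert_mustache_to_xml template placeholder_tag delimiters)

-- ===== LEMMAS AND PROOFS =====

lemma pv_infix_drop_mono {sub t : List Char} {k i : Nat} (hk : k ≤ i)
    (h : sub <:+: t.drop i) : sub <:+: t.drop k := by
  have : t.drop i = (t.drop k).drop (i - k) := by
    rw [List.drop_drop]; congr 1; omega
  rw [this] at h
  exact h.trans (List.drop_suffix _ _).isInfix

lemma pvTagMatch_none_of_not_prefix {t : List Char} {p : String × String}
    (h : ¬ p.1.toList <+: t) : pvTagMatch t p = none := by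
  have hs : PySem.Chars.startswith t p.1.toList = false := by
    rw [Bool.eq_false_iff]
    intro hb
    exact h ((PySem.Chars.startswith_iff _ _).mp hb)
  simp [pvTagMatch, hs]

lemma pvCand_none {t : List Char} {p : String × String} (h : pvCand t p = none) :
    ∀ i : Nat, pvTagMatch (t.drop i) p = none := by
  intro i
  simp only [pvCand] at h
  split_ifs at h with hj hr
  · -- ldel never occurs
    have hinf : ¬ p.1.toList <:+: t := (PySem.Chars.find_eq_neg_one_iff t p.1.toList).mp hj
    apply pvTagMatch_none_of_not_prefix
    intro hb
    have h2 : p.1.toList <:+: t.drop 0 := pv_infix_drop_mono (Nat.zero_le i) hb.isInfix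
    rw [List.drop_zero] at h2
    exact hinf h2
  · -- ldel occurs first at j, but rdel never after j + |ldel|
    have hj0 : 0 ≤ PySem.Chars.find t p.1.toList := by
      have := PySem.Chars.neg_one_le_find t p.1.toList
      omega
    obtain ⟨hpre, hmin⟩ := PySem.Chars.find_spec hj0
    have hjlen : (PySem.Chars.find t p.1.toList).toNat ≤ t.length := by
      have := PySem.Chars.find_le_length t p.1.toList
      omega
    have hllen : p.1.toList.length ≤ (t.drop (PySem.Chars.find t p.1.toList).toNat).length :=
      hpre.length_le
    simp only [List.length_drop] at hllen
    have hcast : PySem.Chars.find t p.1.toList + (p.1.toList.length : Int) =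
        (((PySem.Chars.find t p.1.toList).toNat + p.1.toList.length : Nat) : Int) := by
      push_cast; omega
    rw [hcast] at hr
    have hninf : ¬ p.2.toList <:+:
        t.drop ((PySem.Chars.find t p.1.toList).toNat + p.1.toList.length) :=
      (PySem.Chars.findFrom_natCast_eq_neg_one_iff t p.2.toList _ (by omega)).mp hr
    by_cases hs : PySem.Chars.startswith (t.drop i) p.1.toList = true
    · have hpi : p.1.toList <+: t.drop i := (PySem.Chars.startswith_iff _ _).mp hs
      have hige : (PySem.Chars.find t p.1.toList).toNat ≤ i := by
        by_contra hlt
        exact hmin i (by omega) hpi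
      have hlen2 : p.1.toList.length ≤ (t.drop i).length := hpi.length_le
      have hF2 : PySem.Chars.findFrom (t.drop i) p.2.toList (p.1.toList.length : Int) = -1 := by
        apply (PySem.Chars.findFrom_natCast_eq_neg_one_iff (t.drop i) p.2.toList
          p.1.toList.length hlen2).mpr
        rw [List.drop_drop]
        intro hinf2
        exact hninf (pv_infix_drop_mono (by omega) hinf2)
      simp only [pvTagMatch, hs, if_true]
      rw [if_pos hF2]
    · apply pvTagMatch_none_of_not_prefix
      intro hb
      exact hs ((PySem.Chars.startswith_iff _ _).mpr hb)

lemma pvCand_some {t : List Char} {p : String × String} {j e : Int}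
    (h : pvCand t p = some (j, e)) :
    0 ≤ j ∧ j.toNat ≤ t.length ∧ pvTagMatch (t.drop j.toNat) p = some (e - j) ∧
      ∀ i : Nat, i < j.toNat → pvTagMatch (t.drop i) p = none := by
  simp only [pvCand] at h
  by_cases hj : PySem.Chars.find t p.1.toList = -1
  · rw [if_pos hj] at h
    exact absurd h (by simp)
  rw [if_neg hj] at h
  by_cases hr : PySem.Chars.findFrom t p.2.toList
      (PySem.Chars.find t p.1.toList + (p.1.toList.length : Int)) = -1
  · rw [if_pos hr] at h
    exact absurd h (by simp)
  rw [if_neg hr] at h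
  rw [Option.some_inj, Prod.mk.injEq] at h
  obtain ⟨hje, hee⟩ := h
  have hj0 : 0 ≤ PySem.Chars.find t p.1.toList := by
    have := PySem.Chars.neg_one_le_find t p.1.toList
    omega
  obtain ⟨hpre, hmin⟩ := PySem.Chars.find_spec hj0
  have hjlen : (PySem.Chars.find t p.1.toList).toNat ≤ t.length := by
    have := PySem.Chars.find_le_length t p.1.toList
    omega
  have hllen : p.1.toList.length ≤ (t.drop (PySem.Chars.find t p.1.toList).toNat).length :=
    hpre.length_le
  simp only [List.length_drop] at hllen
  have hcast : PySem.Chars.find t p.1.toList + (p.1.toList.length : Int) =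
      (((PySem.Chars.find t p.1.toList).toNat + p.1.toList.length : Nat) : Int) := by
    push_cast; omega
  rw [hcast] at hr hee
  rw [PySem.Chars.findFrom_natCast t p.2.toList _ (by omega)] at hr hee
  by_cases hf : PySem.Chars.find
      (t.drop ((PySem.Chars.find t p.1.toList).toNat + p.1.toList.length)) p.2.toList = -1
  · rw [if_pos hf] at hr
    exact absurd rfl hr
  rw [if_neg hf] at hee
  have hf0 : 0 ≤ PySem.Chars.find
      (t.drop ((PySem.Chars.find t p.1.toList).toNat + p.1.toList.length)) p.2.toList := by
    have := PySem.Chars.neg_one_le_find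
      (t.drop ((PySem.Chars.find t p.1.toList).toNat + p.1.toList.length)) p.2.toList
    omega
  subst hje
  refine ⟨hj0, hjlen, ?_, ?_⟩
  · have hs : PySem.Chars.startswith (t.drop (PySem.Chars.find t p.1.toList).toNat)
        p.1.toList = true := (PySem.Chars.startswith_iff _ _).mpr hpre
    have hF2 : PySem.Chars.findFrom (t.drop (PySem.Chars.find t p.1.toList).toNat)
        p.2.toList (p.1.toList.length : Int) =
        (p.1.toList.length : Int) + PySem.Chars.find
          (t.drop ((PySem.Chars.find t p.1.toList).toNat + p.1.toList.length)) p.2.toList := by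
      rw [PySem.Chars.findFrom_natCast _ p.2.toList p.1.toList.length (by simpa using hllen)]
      rw [List.drop_drop]
      rw [if_neg hf]
    simp only [pvTagMatch, hs, if_true, hF2]
    rw [if_neg (by omega)]
    rw [Option.some_inj]
    omega
  · intro i hi
    exact pvTagMatch_none_of_not_prefix (hmin i hi)

lemma pvTagMatch_bounds {t : List Char} {p : String × String} {m : Int}
    (h : pvTagMatch t p = some m) : 0 ≤ m ∧ m ≤ t.length ∧ (p ≠ ("", "") → 1 ≤ m) := by
  simp only [pvTagMatch] at h
  split_ifs at h with hs hf
  have hpre := (PySem.Chars.startswith_iff _ _).mp hs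
  have hl : p.1.toList.length ≤ t.length := hpre.length_le
  obtain ⟨h1, h2, _⟩ := PySem.Chars.findFrom_natCast_spec t p.2.toList p.1.toList.length hl hf
  have hr : p.2.toList.length ≤ (t.drop (PySem.Chars.findFrom t p.2.toList (p.1.toList.length : Int)).toNat).length := h2.length_le
  simp only [List.length_drop] at hr
  have hm : m = PySem.Chars.findFrom t p.2.toList (p.1.toList.length : Int) + p.2.toList.length := by
    injection h with h'; omega
  have hle := PySem.Chars.find_le_length (t.drop p.1.toList.length) p.2.toList
  have hF : PySem.Chars.findFrom t p.2.toList (p.1.toList.length : Int) ≤ t.length := by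
    rw [PySem.Chars.findFrom_natCast t p.2.toList p.1.toList.length hl]
    simp only [List.length_drop] at hle
    split_ifs <;> omega
  refine ⟨by omega, by omega, ?_⟩
  intro hne
  by_contra hlt
  have hl0 : p.1.toList.length = 0 := by omega
  have hr0 : p.2.toList.length = 0 := by omega
  exact hne (Prod.ext (String.toList_eq_nil_iff.mp (List.length_eq_zero_iff.mp hl0))
    (String.toList_eq_nil_iff.mp (List.length_eq_zero_iff.mp hr0)))

lemma pvFindTag_bounds {t : List Char} {D : List (String × String)} {m : Int}
    (h : pvFindTag t D = some m) (hD : ("", "") ∉ D) : 1 ≤ m ∧ m ≤ t.length := by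
  induction D with
  | nil => simp [pvFindTag] at h
  | cons p rest ih =>
    simp only [pvFindTag] at h
    cases htm : pvTagMatch t p with
    | some e =>
      rw [htm] at h
      injection h with h'
      subst h'
      obtain ⟨_, h2, h3⟩ := pvTagMatch_bounds htm
      exact ⟨h3 (fun hpe => hD (by simp [hpe])), h2⟩
    | none =>
      rw [htm] at h
      exact ih h (fun hm' => hD (by simp [hm']))

lemma pvFindTag_of_all_none {t : List Char} {D : List (String × String)}
    (h : ∀ p ∈ D, pvTagMatch t p = none) : pvFindTag t D = none := by
  induction D with
  | nil => rfl
  | cons p rest ih =>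
    simp only [pvFindTag, h p (by simp)]
    exact ih (fun q hq => h q (by simp [hq]))

def pvInv (t : List Char) (E : List (String × String)) : Option (Int × Int) → Prop
  | none => ∀ p ∈ E, pvCand t p = none
  | some (j, e) =>
      ∃ E₁ p E₂, E = E₁ ++ p :: E₂ ∧ pvCand t p = some (j, e) ∧
        (∀ q ∈ E₁, ∀ j' e', pvCand t q = some (j', e') → j < j') ∧
        (∀ q ∈ E₂, ∀ j' e', pvCand t q = some (j', e') → j ≤ j')

lemma pvBestAux_inv (t : List Char) :
    ∀ (D E : List (String × String)) (best : Option (Int × Int)), pvInv t E best →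
      pvInv t (E ++ D) (pvBestAux t best D) := by
  intro D
  induction D with
  | nil => intro E best h; simpa [pvBestAux]
  | cons p rest ih =>
    intro E best h
    cases hc : pvCand t p with
    | none =>
      have hstep : pvInv t (E ++ [p]) best := by
        cases best with
        | none =>
          intro q hq
          rcases List.mem_append.mp hq with hq | hq
          · exact h q hq
          · simp at hq; subst hq; exact hc
        | some b =>
          obtain ⟨j, e⟩ := b
          obtain ⟨E₁, p₀, E₂, hsplit, hcp, h₁, h₂⟩ := h
          refine ⟨E₁, p₀, E₂ ++ [p], by simp [hsplit], hcp, h₁, ?_⟩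
          intro q hq j' e' hq'
          rcases List.mem_append.mp hq with hq | hq
          · exact h₂ q hq j' e' hq'
          · simp at hq; subst hq; rw [hc] at hq'; exact absurd hq' (by simp)
      have hrun : pvBestAux t best (p :: rest) = pvBestAux t best rest := by
        simp [pvBestAux, hc]
      rw [hrun]
      have := ih (E ++ [p]) best hstep
      simpa [List.append_assoc] using this
    | some c =>
      obtain ⟨cj, ce⟩ := c
      cases best with
      | none =>
        have hstep : pvInv t (E ++ [p]) (some (cj, ce)) := by
          refine ⟨E, p, [], by simp, hc, ?_, by simp⟩
          intro q hq j' e' hq'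
          exact absurd hq' (by simp [h q hq])
        have hrun : pvBestAux t none (p :: rest) = pvBestAux t (some (cj, ce)) rest := by
          simp [pvBestAux, hc]
        rw [hrun]
        have := ih (E ++ [p]) _ hstep
        simpa [List.append_assoc] using this
      | some b =>
        obtain ⟨j, e⟩ := b
        obtain ⟨E₁, p₀, E₂, hsplit, hcp, h₁, h₂⟩ := h
        by_cases hlt : cj < j
        · have hstep : pvInv t (E ++ [p]) (some (cj, ce)) := by
            refine ⟨E, p, [], by simp, hc, ?_, by simp⟩
            intro q hq j' e' hq'
            rw [hsplit] at hq
            rcases List.mem_append.mp hq with hq | hq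
            · exact lt_trans hlt (h₁ q hq j' e' hq')
            · rcases List.mem_cons.mp hq with hq | hq
              · subst hq
                rw [hcp] at hq'
                rw [Option.some_inj, Prod.mk.injEq] at hq'
                omega
              · exact lt_of_lt_of_le hlt (h₂ q hq j' e' hq')
          have hrun : pvBestAux t (some (j, e)) (p :: rest) =
              pvBestAux t (some (cj, ce)) rest := by
            simp [pvBestAux, hc, hlt]
          rw [hrun]
          have := ih (E ++ [p]) _ hstep
          simpa [List.append_assoc] using this
        · have hstep : pvInv t (E ++ [p]) (some (j, e)) := by
            refine ⟨E₁, p₀, E₂ ++ [p], by simp [hsplit], hcp, h₁, ?_⟩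
            intro q hq j' e' hq'
            rcases List.mem_append.mp hq with hq | hq
            · exact h₂ q hq j' e' hq'
            · simp at hq; subst hq
              rw [hc] at hq'
              rw [Option.some_inj, Prod.mk.injEq] at hq'
              omega
          have hrun : pvBestAux t (some (j, e)) (p :: rest) =
              pvBestAux t (some (j, e)) rest := by
            simp [pvBestAux, hc, hlt]
          rw [hrun]
          have := ih (E ++ [p]) _ hstep
          simpa [List.append_assoc] using this

lemma pvFindTag_append {t : List Char} {D₁ D₂ : List (String × String)}
    (h : ∀ p ∈ D₁, pvTagMatch t p = none) :
    pvFindTag t (D₁ ++ D₂) = pvFindTag t D₂ := by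
  induction D₁ with
  | nil => rfl
  | cons p rest ih =>
    simp only [List.cons_append, pvFindTag, h p (by simp)]
    exact ih (fun q hq => h q (by simp [hq]))

lemma pvBest_none {t : List Char} {D : List (String × String)} (h : pvBest t D = none) :
    ∀ i : Nat, pvFindTag (t.drop i) D = none := by
  intro i
  have hinv := pvBestAux_inv t D [] none (by intro q hq; simp at hq)
  rw [List.nil_append] at hinv
  unfold pvBest at h
  rw [h] at hinv
  exact pvFindTag_of_all_none (fun p hp => pvCand_none (hinv p hp) i)

lemma pvBest_some {t : List Char} {D : List (String × String)} {j e : Int}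
    (h : pvBest t D = some (j, e)) :
    0 ≤ j ∧ j.toNat ≤ t.length ∧ pvFindTag (t.drop j.toNat) D = some (e - j) ∧
      ∀ i : Nat, i < j.toNat → pvFindTag (t.drop i) D = none := by
  have hinv := pvBestAux_inv t D [] none (by intro q hq; simp at hq)
  rw [List.nil_append] at hinv
  unfold pvBest at h
  rw [h] at hinv
  obtain ⟨E₁, p, E₂, hsplit, hcp, h₁, h₂⟩ := hinv
  obtain ⟨hj0, hjlen, hmatch, hminp⟩ := pvCand_some hcp
  have hE₁none : ∀ q ∈ E₁, ∀ i : Nat, i ≤ j.toNat → pvTagMatch (t.drop i) q = none := by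
    intro q hq i hi
    cases hcq : pvCand t q with
    | none => exact pvCand_none hcq i
    | some c =>
      obtain ⟨j', e'⟩ := c
      have hlt := h₁ q hq j' e' hcq
      obtain ⟨hj'0, _, _, hmin'⟩ := pvCand_some hcq
      exact hmin' i (by omega)
  have hE₂none : ∀ q ∈ E₂, ∀ i : Nat, i < j.toNat → pvTagMatch (t.drop i) q = none := by
    intro q hq i hi
    cases hcq : pvCand t q with
    | none => exact pvCand_none hcq i
    | some c =>
      obtain ⟨j', e'⟩ := c
      have hle := h₂ q hq j' e' hcq
      obtain ⟨hj'0, _, _, hmin'⟩ := pvCand_some hcq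
      exact hmin' i (by omega)
  refine ⟨hj0, hjlen, ?_, ?_⟩
  · rw [hsplit, pvFindTag_append (fun q hq => hE₁none q hq j.toNat le_rfl)]
    simp only [pvFindTag, hmatch]
  · intro i hi
    rw [hsplit]
    apply pvFindTag_of_all_none
    intro q hq
    rcases List.mem_append.mp hq with hq | hq
    · exact hE₁none q hq i (by omega)
    · rcases List.mem_cons.mp hq with hq | hq
      · subst hq; exact hminp i hi
      · exact hE₂none q hq i hi

lemma pvTokenize_all_none {D : List (String × String)} :
    ∀ (t : List Char) (n : Nat) (lit : List Char), t.length ≤ n →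
      (∀ i : Nat, pvFindTag (t.drop i) D = none) →
      pvTokenize D (n + 1) t lit = if lit ++ t ≠ [] then [("literal", lit ++ t)] else [] := by
  intro t
  induction t with
  | nil => intro n lit _ _; simp [pvTokenize]
  | cons c rest ih =>
    intro n lit hn hall
    have h0 : pvFindTag (c :: rest) D = none := by
      have := hall 0
      simpa using this
    cases n with
    | zero => simp at hn
    | succ n =>
      have : pvTokenize D (n + 1 + 1) (c :: rest) lit =
          pvTokenize D (n + 1) rest (lit ++ [c]) := by
        simp [pvTokenize, h0]
      rw [this, ih n (lit ++ [c]) (by simpa using hn) (fun i => by simpa using hall (i + 1))]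
      simp

lemma pvTokenize_first_match {D : List (String × String)} :
    ∀ (k : Nat) (t : List Char) (n : Nat) (lit : List Char) (m : Int), k ≤ n →
      (∀ i : Nat, i < k → pvFindTag (t.drop i) D = none) →
      pvFindTag (t.drop k) D = some m → 1 ≤ m → m ≤ ((t.drop k).length : Int) →
      pvTokenize D (n + 1) t lit =
        ("literal", lit ++ t.take k) ::
        ("tag", PySem.List.slice (t.drop k) (some 0) (some m)) ::
        pvTokenize D (n - k) (PySem.List.slice (t.drop k) (some m) none) [] := by
  intro k
  induction k with
  | zero =>
    intro t n lit m _ _ hk h1 h2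
    simp only [List.drop_zero] at hk h2 ⊢
    cases t with
    | nil => simp at h2; omega
    | cons c rest =>
      simp only [pvTokenize, hk, List.take_zero, List.append_nil]
      rfl
  | succ k ihk =>
    intro t n lit m hn hlt hk h1 h2
    cases t with
    | nil =>
      simp at h2
      omega
    | cons c rest =>
      have h0 : pvFindTag (c :: rest) D = none := by
        have := hlt 0 (by omega)
        simpa using this
      cases n with
      | zero => omega
      | succ n =>
        have hstep : pvTokenize D (n + 1 + 1) (c :: rest) lit =
            pvTokenize D (n + 1) rest (lit ++ [c]) := by
          simp [pvTokenize, h0]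
        rw [hstep, ihk rest n (lit ++ [c]) m (by omega)
          (fun i hi => by simpa using hlt (i + 1) (by omega))
          (by simpa using hk) h1 (by simpa using h2)]
        simp

lemma pvConvStep_lit (pt : String) (acc : List Char × Int × PySem.Dict String String)
    (l : List Char) : pvConvStep pt acc ("literal", l) = (acc.1 ++ l, acc.2.1, acc.2.2) := by
  simp [pvConvStep]

lemma pvConvStep_tag (pt : String) (acc : List Char × Int × PySem.Dict String String)
    (l : List Char) : pvConvStep pt acc ("tag", l) =
      (acc.1 ++ pvPH pt.toList acc.2.1, acc.2.1 + 1,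
        acc.2.2.insert (pvKey pt.toList acc.2.1) (String.ofList l)) := by
  simp [pvConvStep]

lemma pvMain (pt : String) (D : List (String × String)) (hD : ("", "") ∉ D) :
    ∀ (N : Nat) (t : List Char), t.length ≤ N →
      ∀ (n n' : Nat) (lit parts : List Char) (cnt : Int) (d : PySem.Dict String String),
        t.length ≤ n → t.length ≤ n' →
        ((pvTokenize D (n + 1) t lit).foldl (pvConvStep pt) (parts, cnt, d)).1 =
            (pvLoop pt D (n' + 1) t (parts ++ lit) cnt d).1 ∧
        ((pvTokenize D (n + 1) t lit).foldl (pvConvStep pt) (parts, cnt, d)).2.2 =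
            (pvLoop pt D (n' + 1) t (parts ++ lit) cnt d).2 := by
  intro N
  induction N with
  | zero =>
    intro t ht n n' lit parts cnt d _ _
    have ht0 : t = [] := List.length_eq_zero_iff.mp (by omega)
    subst ht0
    simp only [pvTokenize, pvLoop]
    by_cases hl : lit = []
    · subst hl; simp
    · simp [hl, pvConvStep]
  | succ N ih =>
    intro t ht n n' lit parts cnt d hn hn'
    cases t with
    | nil =>
      simp only [pvTokenize, pvLoop]
      by_cases hl : lit = []
      · subst hl; simp
      · simp [hl, pvConvStep]
    | cons c rest =>
      cases n with
      | zero => simp at hn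
      | succ n =>
      cases n' with
      | zero => simp at hn'
      | succ n' =>
      cases hbest : pvBest (c :: rest) D with
      | none =>
        have hall := pvBest_none hbest
        rw [pvTokenize_all_none (c :: rest) (n + 1) lit hn hall]
        have hB : pvLoop pt D (n' + 1 + 1) (c :: rest) (parts ++ lit) cnt d =
            ((parts ++ lit) ++ (c :: rest), d) := by
          simp [pvLoop, hbest]
        rw [hB]
        simp [pvConvStep]
      | some je =>
        obtain ⟨j, e⟩ := je
        obtain ⟨hj0, hjlen, hmatch, hmin⟩ := pvBest_some hbest
        obtain ⟨h1m, h2m⟩ := pvFindTag_bounds hmatch hD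
        have he0 : 0 ≤ e := by omega
        -- tokenizer: literal run up to j.toNat, then the tag
        rw [pvTokenize_first_match j.toNat (c :: rest) (n + 1) lit (e - j) (by omega) hmin hmatch
          h1m (by omega)]
        rw [List.foldl_cons, List.foldl_cons, pvConvStep_lit, pvConvStep_tag]
        -- B: one loop step
        have hB : pvLoop pt D (n' + 1 + 1) (c :: rest) (parts ++ lit) cnt d =
            pvLoop pt D (n' + 1) (PySem.List.slice (c :: rest) (some e) none)
              ((parts ++ lit) ++ PySem.List.slice (c :: rest) none (some j) ++ pvPH pt.toList cnt)
              (cnt + 1)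
              (d.insert (pvKey pt.toList cnt)
                (String.ofList (PySem.List.slice (c :: rest) (some j) (some e)))) := by
          simp [pvLoop, hbest]
        rw [hB]
        -- identify the three slices
        have hsl1 : PySem.List.slice (c :: rest) none (some j) = (c :: rest).take j.toNat :=
          PySem.List.slice_to (c :: rest) hj0
        have hsl2 : PySem.List.slice ((c :: rest).drop j.toNat) (some 0) (some (e - j)) =
            PySem.List.slice (c :: rest) (some j) (some e) := by
          rw [PySem.List.slice_zero_start, PySem.List.slice_to _ (by omega),
            PySem.List.slice_toNat _ hj0 he0]
          congr 1
          omega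
        have hsl3 : PySem.List.slice ((c :: rest).drop j.toNat) (some (e - j)) none =
            PySem.List.slice (c :: rest) (some e) none := by
          rw [PySem.List.slice_from _ (by omega), PySem.List.slice_from _ he0,
            List.drop_drop]
          congr 1
          omega
        rw [hsl1, hsl2, hsl3]
        -- apply the induction hypothesis to the rest of the template
        have hnext : (PySem.List.slice (c :: rest) (some e) none).length =
            (c :: rest).length - e.toNat := by
          rw [PySem.List.slice_from _ he0, List.length_drop]
        have hlen2 : (PySem.List.slice (c :: rest) (some e) none).length ≤ N := by
          rw [hnext]
          have h1e : 1 ≤ e.toNat := by omega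
          have h2e : (c :: rest).length ≤ N + 1 := ht
          omega
        have harith1 : (PySem.List.slice (c :: rest) (some e) none).length ≤ n + 1 - j.toNat - 1 := by
          rw [hnext]
          have hcl : j.toNat + (e - j).toNat ≤ (c :: rest).length := by
            simp only [List.length_drop] at h2m
            omega
          omega
        have harith2 : (PySem.List.slice (c :: rest) (some e) none).length ≤ n' := by
          rw [hnext]; omega
        have hfuel : n + 1 - j.toNat = (n + 1 - j.toNat - 1) + 1 := by
          have hcl : j.toNat + (e - j).toNat ≤ (c :: rest).length := by
            simp only [List.length_drop] at h2m
            omega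
          omega
        rw [hfuel]
        have := ih (PySem.List.slice (c :: rest) (some e) none) hlen2
          (n + 1 - j.toNat - 1) n' []
          (parts ++ (lit ++ (c :: rest).take j.toNat) ++ pvPH pt.toList cnt)
          (cnt + 1)
          (d.insert (pvKey pt.toList cnt)
            (String.ofList (PySem.List.slice (c :: rest) (some j) (some e))))
          harith1 harith2
        rw [List.append_nil] at this
        refine ⟨?_, ?_⟩
        · rw [this.1]
          congr 2
          simp [List.append_assoc]
        · rw [this.2]
          congr 3
          simp [List.append_assoc]

-- ===== VERDICT (by name: the statement is the Claim_ definition above) =====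
theorem convert_mustache_to_xml_spec : Claim_equal_convert_mustache_to_xml := by
  intro template placeholder_tag delimiters _hdom hpre
  unfold Spec_convert_mustache_to_xml
  rcases hpre with h | h
  · subst h; rfl
  · have hM := pvMain placeholder_tag delimiters h template.toList.length template.toList
      le_rfl template.toList.length template.toList.length [] [] 0
      (∅ : PySem.Dict String String) le_rfl le_rfl
    simp only [List.nil_append] at hM
    unfold convert_mustache_to_xml convert_mustache_to_xml_alt
    exact Prod.ext (congrArg String.ofList hM.1) (congrArg PySem.Dict.items hM.2)
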